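-- pv_equiv track=rewrite | github.com/nomindnick/csba-ai-pres-survey-planning | demos/04-research/scripts/counselor_analysis.py | score_record
-- ===== SOURCE A (Python) =====
-- POSITIVE = {"great", "excellent", "improved", "better", "smooth", "helpful",
--             "good", "easy", "appreciate", "intuitive", "clear"}
--
-- NEGATIVE = {"frustrated", "terrible", "poor", "difficult", "disruption",
--             "problem", "issue", "confusing", "rushed", "broken", "fail",
--             "worse", "struggle", "complaint", "disappointed"}
--
-- QUESTIONS = ["q1", "q2", "q3", "q4", "q5"]
--
-- def score_text(text):
--     """Return (pos_count, neg_count, net_score) for a text."""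
--     if not text:
--         return 0, 0, 0
--     words = text.lower().split()
--     # Also catch word variants by checking if any keyword is a substring of each word
--     pos = sum(1 for w in words for kw in POSITIVE if kw in w)
--     neg = sum(1 for w in words for kw in NEGATIVE if kw in w)
--     return pos, neg, pos - neg
--
-- def score_record(rec, questions=None):
--     """Score all questions (or a subset) for a record."""
--     qs = questions or QUESTIONS
--     total_pos, total_neg = 0, 0
--     for q in qs:
--         p, n, _ = score_text(rec[q])
--         total_pos += p
--         total_neg += n
--     return total_pos, total_neg, total_pos - total_neg
-- ===== SOURCE B (Python) =====
-- POSITIVE = {"great", "excellent", "improved", "better", "smooth", "helpful",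
--             "good", "easy", "appreciate", "intuitive", "clear"}
--
-- NEGATIVE = {"frustrated", "terrible", "poor", "difficult", "disruption",
--             "problem", "issue", "confusing", "rushed", "broken", "fail",
--             "worse", "struggle", "complaint", "disappointed"}
--
-- QUESTIONS = ["q1", "q2", "q3", "q4", "q5"]
--
-- def score_record(rec, questions=None):
--     """Score all questions (or a subset) for a record.
--
--     Instead of scanning every keyword against every word, enumerate each
--     word's substrings once and look them up in the keyword hash sets,
--     collecting the distinct keywords found per word."""
--     total_pos = 0
--     total_neg = 0
--     for q in (questions or QUESTIONS):
--         text = rec[q]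
--         if not text:
--             continue
--         for w in text.lower().split():
--             pos_found = set()
--             neg_found = set()
--             n = len(w)
--             for i in range(n):
--                 for j in range(i + 1, n + 1):
--                     sub = w[i:j]
--                     if sub in POSITIVE:
--                         pos_found.add(sub)
--                     if sub in NEGATIVE:
--                         neg_found.add(sub)
--             total_pos += len(pos_found)
--             total_neg += len(neg_found)
--     return total_pos, total_neg, total_pos - total_neg
-- ===== Notes on version B (the rewrite author's own statement) =====
-- stated objective: alternative
-- what changed: Inverts the matching direction: instead of scanning every keyword for a substring hit in every word (A's two keyword passes per field via score_text), B enumerates each word's substrings once and looks them up in the POSITIVE/NEGATIVE hash sets, collecting the distinct keywords found per word in sets and adding their sizes to running totals.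
-- outside the precondition, e.g. on score_record({}, None): A raises KeyError, B raises KeyError
import Mathlib
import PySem

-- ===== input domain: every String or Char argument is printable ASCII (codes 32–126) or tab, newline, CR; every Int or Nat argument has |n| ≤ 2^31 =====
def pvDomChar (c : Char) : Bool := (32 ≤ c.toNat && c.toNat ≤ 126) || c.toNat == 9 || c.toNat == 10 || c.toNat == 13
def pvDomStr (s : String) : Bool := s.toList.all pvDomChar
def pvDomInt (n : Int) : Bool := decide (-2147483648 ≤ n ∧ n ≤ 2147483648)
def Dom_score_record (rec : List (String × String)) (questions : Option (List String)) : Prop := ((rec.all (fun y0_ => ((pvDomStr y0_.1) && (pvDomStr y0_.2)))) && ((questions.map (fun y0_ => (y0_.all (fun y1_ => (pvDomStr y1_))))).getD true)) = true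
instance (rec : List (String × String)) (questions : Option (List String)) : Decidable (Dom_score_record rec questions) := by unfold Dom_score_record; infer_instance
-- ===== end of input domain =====

-- B inverts the matching direction: instead of scanning every keyword for a substring hit in
-- every word, it enumerates each word's substrings once and looks them up in the keyword sets,
-- counting the distinct keywords found per word (objective: alternative algorithm, same results).

-- module constants (Python sets iterated as lists in written order; the counts are order-independent)
def pvPOSITIVE : List String := ["great", "excellent", "improved", "better", "smooth", "helpful",
  "good", "easy", "appreciate", "intuitive", "clear"]
def pvNEGATIVE : List String := ["frustrated", "terrible", "poor", "difficult", "disruption",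
  "problem", "issue", "confusing", "rushed", "broken", "fail",
  "worse", "struggle", "complaint", "disappointed"]
def pvQUESTIONS : List String := ["q1", "q2", "q3", "q4", "q5"]

-- ===== PORT A =====
-- sum(1 for w in words for kw in kws if kw in w), as the nested loop it is
def pvCountStep (w : String) (a : Int) (kw : String) : Int :=
  if PySem.Str.isIn kw w then a + 1 else a
def pvSumHits (kws : List String) (words : List String) : Int :=
  words.foldl (fun acc w => kws.foldl (pvCountStep w) acc) 0

def score_text (text : String) : Int × Int × Int :=
  if text = "" then (0, 0, 0)
  else
    let words := PySem.Str.split₀ (PySem.Str.lower text)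
    let pos := pvSumHits pvPOSITIVE words
    let neg := pvSumHits pvNEGATIVE words
    (pos, neg, pos - neg)

-- rec[q]: KeyError (none) is excluded by Pre_; the getD "" default is never reached there
def pvAStep (rec : List (String × String)) (a : Int × Int) (q : String) : Int × Int :=
  let r := score_text ((PySem.Dict.get? (PySem.Dict.mk rec) q).getD "")
  (a.1 + r.1, a.2 + r.2.1)

def score_record (rec : List (String × String)) (questions : Option (List String)) : Int × Int × Int :=
  let qs := match questions with
    | none => pvQUESTIONS
    | some l => if l = [] then pvQUESTIONS else l   -- 'questions or QUESTIONS'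
  let t := qs.foldl (pvAStep rec) (0, 0)
  (t.1, t.2, t.1 - t.2)

-- ===== PORT B =====
-- the keyword sets as lists of character lists (strings compared pointwise)
def pvPOSc : List (List Char) := pvPOSITIVE.map String.toList
def pvNEGc : List (List Char) := pvNEGATIVE.map String.toList

-- body of the inner 'for j' loop: sub = w[i:j]; add it to the found-sets it belongs to
def pvSubStep (wl : List Char) (i : Int)
    (st : PySem.Set (List Char) × PySem.Set (List Char)) (j : Int) :
    PySem.Set (List Char) × PySem.Set (List Char) :=
  let sub := PySem.List.slice wl (some i) (some j)
  let st1 := if pvPOSc.contains sub then (PySem.Set.add st.1 sub, st.2) else st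
  if pvNEGc.contains sub then (st1.1, PySem.Set.add st1.2 sub) else st1

-- per word: enumerate all substrings i..j (n = len(w)), collecting the two found-sets
def pvScanSets (wl : List Char) : PySem.Set (List Char) × PySem.Set (List Char) :=
  (PySem.List.pyRange 0 (wl.length : Int) 1).foldl
    (fun st i => (PySem.List.pyRange (i + 1) ((wl.length : Int) + 1) 1).foldl (pvSubStep wl i) st)
    (PySem.Set.empty, PySem.Set.empty)

-- per word: (len(pos_found), len(neg_found))
def pvScanWord (wl : List Char) : Int × Int :=
  (((pvScanSets wl).1.length : Int), ((pvScanSets wl).2.length : Int))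

def pvBWordStep (a : Int × Int) (w : String) : Int × Int :=
  let r := pvScanWord w.toList
  (a.1 + r.1, a.2 + r.2)

def pvQStep (rec : List (String × String)) (a : Int × Int) (q : String) : Int × Int :=
  let text := (PySem.Dict.get? (PySem.Dict.mk rec) q).getD ""
  if text = "" then a
  else (PySem.Str.split₀ (PySem.Str.lower text)).foldl pvBWordStep a

def score_record_alt (rec : List (String × String)) (questions : Option (List String)) : Int × Int × Int :=
  let t := (match questions with
    | none => pvQUESTIONS
    | some l => if l = [] then pvQUESTIONS else l).foldl (pvQStep rec) (0, 0)
  (t.1, t.2, t.1 - t.2)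

-- ===== PRECONDITION & SPEC =====
-- Pre_ excludes exactly the inputs where Python A raises KeyError: every effective question
-- must be a key of rec.
def Pre_score_record (rec : List (String × String)) (questions : Option (List String)) : Prop :=
  ((match questions with
    | none => pvQUESTIONS
    | some l => if l = [] then pvQUESTIONS else l).all
      (fun q => (rec.map Prod.fst).contains q)) = true
instance (rec : List (String × String)) (questions : Option (List String)) : Decidable (Pre_score_record rec questions) := by unfold Pre_score_record; infer_instance

def pvWitness_score_record : (List (String × String)) × Option (List String) :=
  ([("q1", "good day"), ("q2", ""), ("q3", "an issue, clearly")], some ["q1", "q3", "q2"])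

def Spec_score_record (rec : List (String × String)) (questions : Option (List String)) (out : Int × Int × Int) : Prop := out = score_record_alt rec questions
instance (rec : List (String × String)) (questions : Option (List String)) (out : Int × Int × Int) : Decidable (Spec_score_record rec questions out) := by unfold Spec_score_record; infer_instance

-- ===== CLAIM (what is proved, stated in full; the proofs are below) =====
def Claim_equal_score_record : Prop := ∀ (rec : List (String × String)) (questions : Option (List String)), Dom_score_record rec questions → Pre_score_record rec questions → Spec_score_record rec questions (score_record rec questions)

-- ===== LEMMAS AND PROOFS =====

-- ---- A side: the nested count as a filter length ----
theorem countStep_fold (kws : List String) (w : String) (a : Int) :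
    kws.foldl (pvCountStep w) a
      = a + ((kws.filter (fun kw => PySem.Str.isIn kw w)).length : Int) := by
  induction kws generalizing a with
  | nil => simp
  | cons k t ih =>
    simp only [List.foldl_cons, List.filter_cons, pvCountStep]
    rw [ih]
    split_ifs <;> simp only [List.length_cons] <;> push_cast <;> ring

-- ---- B side, step 1: the pair fold splits into two independent set folds ----
theorem foldl_prod {α β ι : Type} (f : α × β → ι → α × β) (f1 : α → ι → α) (f2 : β → ι → β)
    (h : ∀ st x, f st x = (f1 st.1 x, f2 st.2 x)) (l : List ι) (a : α) (b : β) :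
    l.foldl f (a, b) = (l.foldl f1 a, l.foldl f2 b) := by
  induction l generalizing a b with
  | nil => rfl
  | cons x t ih => simp only [List.foldl_cons, h]; exact ih _ _

def pvAddIf (kl : List (List Char)) (wl : List Char) (i : Int)
    (s : PySem.Set (List Char)) (j : Int) : PySem.Set (List Char) :=
  if kl.contains (PySem.List.slice wl (some i) (some j)) then
    PySem.Set.add s (PySem.List.slice wl (some i) (some j)) else s

theorem subStep_prod (wl : List Char) (i : Int) (st : PySem.Set (List Char) × PySem.Set (List Char)) (j : Int) :
    pvSubStep wl i st j = (pvAddIf pvPOSc wl i st.1 j, pvAddIf pvNEGc wl i st.2 j) := by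
  simp only [pvSubStep, pvAddIf]
  split_ifs <;> rfl

-- the one-set fold over j for a fixed i
def pvInner (kl : List (List Char)) (wl : List Char) (n : Int)
    (s : PySem.Set (List Char)) (i : Int) : PySem.Set (List Char) :=
  (PySem.List.pyRange (i + 1) (n + 1) 1).foldl (pvAddIf kl wl i) s

def pvKwSet (kl : List (List Char)) (wl : List Char) : PySem.Set (List Char) :=
  (PySem.List.pyRange 0 wl.length 1).foldl (pvInner kl wl wl.length) PySem.Set.empty

theorem scanWord_split (wl : List Char) :
    pvScanWord wl = (((pvKwSet pvPOSc wl).length : Int), ((pvKwSet pvNEGc wl).length : Int)) := by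
  unfold pvScanWord pvScanSets pvKwSet
  rw [foldl_prod _ (pvInner pvPOSc wl wl.length) (pvInner pvNEGc wl wl.length)]
  intro st i
  exact foldl_prod (pvSubStep wl i) (pvAddIf pvPOSc wl i) (pvAddIf pvNEGc wl i)
    (subStep_prod wl i) _ st.1 st.2

-- ---- step 2: membership and nodup of such folds ----
theorem mem_foldl_of_step {ι : Type} (f : PySem.Set (List Char) → ι → PySem.Set (List Char))
    (Q : ι → List Char → Prop)
    (hmem : ∀ s i x, x ∈ f s i ↔ x ∈ s ∨ Q i x) (l : List ι) (s0 : PySem.Set (List Char)) (x : List Char) :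
    x ∈ l.foldl f s0 ↔ x ∈ s0 ∨ ∃ i ∈ l, Q i x := by
  induction l generalizing s0 with
  | nil => simp
  | cons a t ih =>
    simp only [List.foldl_cons, ih, hmem]
    constructor
    · rintro (( h | h) | ⟨i, hi, h⟩)
      · exact Or.inl h
      · exact Or.inr ⟨a, List.mem_cons_self, h⟩
      · exact Or.inr ⟨i, List.mem_cons_of_mem _ hi, h⟩
    · rintro (h | ⟨i, hi, h⟩)
      · exact Or.inl (Or.inl h)
      · rcases List.mem_cons.mp hi with rfl | hi
        · exact Or.inl (Or.inr h)
        · exact Or.inr ⟨i, hi, h⟩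

theorem nodup_foldl_of_step {ι : Type} (f : PySem.Set (List Char) → ι → PySem.Set (List Char))
    (hn : ∀ s i, s.Nodup → (f s i).Nodup) (l : List ι) (s0 : PySem.Set (List Char))
    (h0 : s0.Nodup) : (l.foldl f s0).Nodup := by
  induction l generalizing s0 with
  | nil => exact h0
  | cons a t ih => exact ih _ (hn _ _ h0)

theorem mem_addIf (kl : List (List Char)) (wl : List Char) (i : Int) (s : PySem.Set (List Char)) (j : Int) (x : List Char) :
    x ∈ pvAddIf kl wl i s j ↔
      x ∈ s ∨ (x ∈ kl ∧ PySem.List.slice wl (some i) (some j) = x) := by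
  unfold pvAddIf
  split_ifs with h
  · rw [PySem.Set.mem_add]
    constructor
    · rintro (hs | rfl)
      · exact Or.inl hs
      · exact Or.inr ⟨by simpa using h, rfl⟩
    · rintro (hs | ⟨_, rfl⟩)
      · exact Or.inl hs
      · exact Or.inr rfl
  · constructor
    · exact Or.inl
    · rintro (hs | ⟨hx, rfl⟩)
      · exact hs
      · exact absurd (by simpa using hx) (by simpa using h)

theorem nodup_addIf (kl : List (List Char)) (wl : List Char) (i : Int) (s : PySem.Set (List Char)) (j : Int)
    (h : s.Nodup) : (pvAddIf kl wl i s j).Nodup := by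
  unfold pvAddIf
  split_ifs
  · exact PySem.Set.nodup_add _ _ h
  · exact h

theorem mem_kwSet (kl : List (List Char)) (wl : List Char) (x : List Char) :
    x ∈ pvKwSet kl wl ↔
      x ∈ kl ∧ ∃ i ∈ PySem.List.pyRange 0 wl.length 1,
        ∃ j ∈ PySem.List.pyRange (i + 1) (wl.length + 1) 1,
          PySem.List.slice wl (some i) (some j) = x := by
  unfold pvKwSet
  rw [mem_foldl_of_step _ (fun i x => x ∈ kl ∧ ∃ j ∈ PySem.List.pyRange (i + 1) ((wl.length : Int) + 1) 1,
        PySem.List.slice wl (some i) (some j) = x)]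
  · constructor
    · rintro (h | ⟨i, hi, hx, j, hj, hs⟩)
      · simp [PySem.Set.empty] at h
      · exact ⟨hx, i, hi, j, hj, hs⟩
    · rintro ⟨hx, i, hi, j, hj, hs⟩
      · exact Or.inr ⟨i, hi, hx, j, hj, hs⟩
  · intro s i x
    unfold pvInner
    rw [mem_foldl_of_step _ (fun j x => x ∈ kl ∧ PySem.List.slice wl (some i) (some j) = x)]
    · constructor
      · rintro (h | ⟨j, hj, hx, hs⟩)
        · exact Or.inl h
        · exact Or.inr ⟨hx, j, hj, hs⟩
      · rintro (h | ⟨hx, j, hj, hs⟩)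
        · exact Or.inl h
        · exact Or.inr ⟨j, hj, hx, hs⟩
    · intro s j x; exact mem_addIf kl wl i s j x

theorem nodup_kwSet (kl : List (List Char)) (wl : List Char) : (pvKwSet kl wl).Nodup := by
  unfold pvKwSet
  refine nodup_foldl_of_step _ ?_ _ _ (by simp [PySem.Set.empty])
  intro s i h
  exact nodup_foldl_of_step _ (fun s j => nodup_addIf kl wl i s j) _ _ h

-- ---- step 3: some substring w[i:j] equals x  ↔  x is a (nonempty) infix of w ----
theorem exists_slice_iff_infix (wl x : List Char) (hx : x ≠ []) :
    (∃ i ∈ PySem.List.pyRange 0 wl.length 1,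
        ∃ j ∈ PySem.List.pyRange (i + 1) (wl.length + 1) 1,
          PySem.List.slice wl (some i) (some j) = x) ↔ x <:+: wl := by
  constructor
  · rintro ⟨i, hi, j, hj, rfl⟩
    rw [PySem.List.mem_pyRange_one] at hi hj
    rw [PySem.List.slice_toNat _ hi.1 (by omega)]
    exact ((wl.drop i.toNat).take_prefix _).isInfix.trans (wl.drop_suffix i.toNat).isInfix
  · rintro ⟨s, t, rfl⟩
    refine ⟨(s.length : Int), ?_, (s.length : Int) + (x.length : Int), ?_, ?_⟩
    · rw [PySem.List.mem_pyRange_one]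
      have : 0 < x.length := List.length_pos_iff.mpr hx
      constructor
      · positivity
      · simp only [List.length_append]; push_cast; omega
    · rw [PySem.List.mem_pyRange_one]
      have : 0 < x.length := List.length_pos_iff.mpr hx
      constructor
      · omega
      · simp only [List.length_append]; push_cast; omega
    · rw [PySem.List.slice_natCast_add]
      rw [List.append_assoc, List.drop_left, List.take_left]

-- ---- step 4: the found-set is a permutation of the matching keywords ----
theorem kwSet_length (kl : List (List Char)) (wl : List Char)
    (hnd : kl.Nodup) (hne : ∀ x ∈ kl, x ≠ []) :
    (pvKwSet kl wl).length = (kl.filter (fun k => PySem.Chars.isIn k wl)).length := by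
  refine List.Perm.length_eq ?_
  rw [List.perm_ext_iff_of_nodup (nodup_kwSet kl wl) (hnd.filter _)]
  intro x
  rw [mem_kwSet, List.mem_filter]
  constructor
  · rintro ⟨hx, h⟩
    exact ⟨hx, (PySem.Chars.isIn_iff_infix _ _).mpr
      ((exists_slice_iff_infix wl x (hne x hx)).mp h)⟩
  · rintro ⟨hx, h⟩
    exact ⟨hx, (exists_slice_iff_infix wl x (hne x hx)).mpr
      ((PySem.Chars.isIn_iff_infix _ _).mp h)⟩

-- ---- step 5: per word, B's scan equals A's per-word counts ----
theorem filter_chars_length (kws : List String) (w : String) :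
    (((kws.map String.toList).filter (fun k => PySem.Chars.isIn k w.toList)).length : Int)
      = ((kws.filter (fun kw => PySem.Str.isIn kw w)).length : Int) := by
  have h : ((fun k => PySem.Chars.isIn k w.toList) ∘ String.toList)
      = (fun kw => PySem.Str.isIn kw w) := by
    funext kw; simp [PySem.Str.isIn]
  simp only [← List.countP_eq_length_filter, List.countP_map, h]

theorem scanWord_eq (w : String) :
    pvScanWord w.toList
      = (((pvPOSITIVE.filter (fun kw => PySem.Str.isIn kw w)).length : Int),
         ((pvNEGATIVE.filter (fun kw => PySem.Str.isIn kw w)).length : Int)) := by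
  rw [scanWord_split, kwSet_length pvPOSc w.toList (by decide) (by decide),
      kwSet_length pvNEGc w.toList (by decide) (by decide)]
  exact Prod.ext (filter_chars_length pvPOSITIVE w) (filter_chars_length pvNEGATIVE w)

-- ---- step 6: fold over the words, then over the questions ----
theorem wordsFold_eq (ws : List String) (a : Int × Int) :
    ws.foldl pvBWordStep a
      = (ws.foldl (fun acc w => pvPOSITIVE.foldl (pvCountStep w) acc) a.1,
         ws.foldl (fun acc w => pvNEGATIVE.foldl (pvCountStep w) acc) a.2) := by
  induction ws generalizing a with
  | nil => rfl
  | cons w t ih =>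
    simp only [List.foldl_cons, ih, pvBWordStep, scanWord_eq, countStep_fold]

theorem sumHits_shift (kws : List String) (ws : List String) (a : Int) :
    ws.foldl (fun acc w => kws.foldl (pvCountStep w) acc) a = a + pvSumHits kws ws := by
  unfold pvSumHits
  induction ws generalizing a with
  | nil => simp
  | cons w t ih =>
    simp only [List.foldl_cons]
    rw [ih, ih (kws.foldl (pvCountStep w) 0), countStep_fold, countStep_fold]
    ring

theorem qStep_eq (rec : List (String × String)) (a : Int × Int) (q : String) :
    pvQStep rec a q = pvAStep rec a q := by
  by_cases h : ((PySem.Dict.get? (PySem.Dict.mk rec) q).getD "") = ""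
  · simp [pvQStep, pvAStep, score_text, h]
  · simp only [pvQStep, pvAStep, score_text, h, if_false, wordsFold_eq, sumHits_shift]

theorem step_funext (rec : List (String × String)) : pvQStep rec = pvAStep rec :=
  funext fun a => funext fun q => qStep_eq rec a q

-- ===== VERDICT (by name: the statement is the Claim_ definition above) =====
theorem score_record_spec : Claim_equal_score_record := by
  intro rec questions _ _
  unfold Spec_score_record score_record score_record_alt
  rw [step_funext]
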